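-- pv_equiv track=rewrite | github.com/AlexandreTravers/optizonions | UI/windows.py | trouver_indices
-- ===== SOURCE A (Python) =====
-- def trouver_indices(element1, element2, contraintes):
--
--     index_entite1 = index_element1 = index_entite2 = index_element2 = None
--
--
--     for index_entite, (entite, elements) in enumerate(contraintes):
--         if element1 in elements:
--             index_entite1, index_element1 = index_entite, elements.index(element1)
--         if element2 in elements:
--             index_entite2, index_element2 = index_entite, elements.index(element2)
--
--     if None not in [index_entite1, index_element1, index_entite2, index_element2]:
--         return [index_entite1, index_element1], [index_entite2, index_element2]
--     else:
--         return None
-- ===== SOURCE B (Python) =====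
-- def trouver_indices(element1, element2, contraintes):
--     def find(target):
--         # scan from the back: first hit = last matching constraint
--         for i in range(len(contraintes) - 1, -1, -1):
--             elements = contraintes[i][1]
--             if target in elements:
--                 return [i, elements.index(target)]
--         return None
--     a = find(element1)
--     b = find(element2)
--     if a is None or b is None:
--         return None
--     return a, b
-- ===== Notes on version B (the rewrite author's own statement) =====
-- stated objective: simpler
-- what changed: A single forward pass tracking four mutable indices for both elements is replaced by a helper that scans the constraint list from the back with an early return (first hit from the back = A's last match), called once per element.
import Mathlib
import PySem

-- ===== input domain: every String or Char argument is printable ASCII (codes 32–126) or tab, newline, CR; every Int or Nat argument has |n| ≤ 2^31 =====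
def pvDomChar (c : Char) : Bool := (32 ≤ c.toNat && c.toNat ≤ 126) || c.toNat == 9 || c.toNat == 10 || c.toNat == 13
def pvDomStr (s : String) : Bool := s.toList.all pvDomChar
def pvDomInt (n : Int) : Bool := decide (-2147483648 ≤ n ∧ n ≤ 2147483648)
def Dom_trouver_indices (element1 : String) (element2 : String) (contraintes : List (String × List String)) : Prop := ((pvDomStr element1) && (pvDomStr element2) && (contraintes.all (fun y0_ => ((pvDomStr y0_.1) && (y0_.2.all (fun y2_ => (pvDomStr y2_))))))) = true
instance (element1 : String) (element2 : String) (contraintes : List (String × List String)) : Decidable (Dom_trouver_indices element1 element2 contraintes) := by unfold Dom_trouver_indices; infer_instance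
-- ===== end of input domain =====

-- B replaces A's single combined forward pass (four mutable variables) by a per-element
-- backward scan with early exit; same results, simpler decomposition.

-- ===== PORT A =====
-- state: (index_entite1, index_element1, index_entite2, index_element2)
def trouverLoopA (element1 element2 : String) :
    List (Int × (String × List String)) →
    (Option Int × Option Int × Option Int × Option Int) →
    (Option Int × Option Int × Option Int × Option Int)
  | [], st => st
  | (index_entite, (_, elements)) :: rest, (a1, b1, a2, b2) =>
    let (a1, b1) := if element1 ∈ elements then
        (some index_entite, (PySem.List.index? elements element1).map (Int.ofNat)) else (a1, b1)
    let (a2, b2) := if element2 ∈ elements then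
        (some index_entite, (PySem.List.index? elements element2).map (Int.ofNat)) else (a2, b2)
    trouverLoopA element1 element2 rest (a1, b1, a2, b2)

def trouver_indices (element1 : String) (element2 : String) (contraintes : List (String × List String)) : Option (List Int × List Int) :=
  match trouverLoopA element1 element2 (PySem.List.enumerate contraintes) (none, none, none, none) with
  -- "if None not in [...]": all four are set
  | (some a1, some b1, some a2, some b2) => some ([a1, b1], [a2, b2])
  | _ => none

-- ===== PORT B =====
-- find(target): for i in range(len(contraintes)-1, -1, -1): …  — fuel = i+1, tries index i first
def findB (target : String) (contraintes : List (String × List String)) : Nat → Option (List Int)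
  | 0 => none
  | i + 1 =>
    let elements := (contraintes[i]?.getD ("", [])).2
    if target ∈ elements then
      some [(i : Int), ((PySem.List.index? elements target).getD 0 : Nat)]
    else findB target contraintes i

def trouver_indices_alt (element1 : String) (element2 : String) (contraintes : List (String × List String)) : Option (List Int × List Int) :=
  let a := findB element1 contraintes contraintes.length
  let b := findB element2 contraintes contraintes.length
  if a.isNone || b.isNone then none
  else some (a.getD [], b.getD [])

-- ===== PRECONDITION & SPEC =====
def Spec_trouver_indices (element1 : String) (element2 : String) (contraintes : List (String × List String)) (out : Option (List Int × List Int)) : Prop := out = trouver_indices_alt element1 element2 contraintes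
instance (element1 : String) (element2 : String) (contraintes : List (String × List String)) (out : Option (List Int × List Int)) : Decidable (Spec_trouver_indices element1 element2 contraintes out) := by unfold Spec_trouver_indices; infer_instance

-- ===== CLAIM (what is proved, stated in full; the proofs are below) =====
def Claim_equal_trouver_indices : Prop := ∀ (element1 : String) (element2 : String) (contraintes : List (String × List String)), Dom_trouver_indices element1 element2 contraintes → Spec_trouver_indices element1 element2 contraintes (trouver_indices element1 element2 contraintes)

-- ===== LEMMAS AND PROOFS =====

-- the "last matching constraint" both programs compute, as a forward recursion
def lastMatch (target : String) (i : Nat) : List (String × List String) → Option (Nat × Nat)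
  | [] => none
  | (_, elements) :: rest =>
    match lastMatch target (i + 1) rest with
    | some r => some r
    | none =>
      if target ∈ elements then some (i, (PySem.List.index? elements target).getD 0)
      else none

theorem some_cast_getD_idxOf? {α : Type} [DecidableEq α] (xs : List α) (v : α) (h : v ∈ xs) :
    some ((((List.idxOf? v xs).getD 0 : Nat) : Int)) = (List.idxOf? v xs).map Int.ofNat := by
  have hs := (PySem.List.index?_isSome_iff xs v).2 h
  rw [PySem.List.index?_eq_idxOf?] at hs
  rcases Option.isSome_iff_exists.1 hs with ⟨k, hk⟩
  rw [hk]; rfl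

-- A's loop for one target equals lastMatch (or keeps the accumulator)
theorem loopA_pair (element1 element2 : String) (cs : List (String × List String)) :
    ∀ (i : Nat) (a1 b1 a2 b2 : Option Int),
      trouverLoopA element1 element2 (PySem.List.enumerate cs (i : Int)) (a1, b1, a2, b2) =
        (let p1 := match lastMatch element1 i cs with
          | some (x, y) => ((some (x : Int) : Option Int), (some (y : Int) : Option Int))
          | none => (a1, b1)
         let p2 := match lastMatch element2 i cs with
          | some (x, y) => ((some (x : Int) : Option Int), (some (y : Int) : Option Int))
          | none => (a2, b2)
         (p1.1, p1.2, p2.1, p2.2)) := by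
  induction cs with
  | nil => intro i a1 b1 a2 b2; simp [PySem.List.enumerate_nil, trouverLoopA, lastMatch]
  | cons hd tl ih =>
    intro i a1 b1 a2 b2
    obtain ⟨s, elements⟩ := hd
    rw [PySem.List.enumerate_cons]
    show trouverLoopA element1 element2 (((i : Int), (s, elements)) :: PySem.List.enumerate tl ((i : Int) + 1)) _ = _
    rw [trouverLoopA]
    have hcast : ((i : Int) + 1) = ((i + 1 : Nat) : Int) := by push_cast; ring
    rw [hcast]
    by_cases h1 : element1 ∈ elements <;> by_cases h2 : element2 ∈ elements <;>
      simp only [h1, h2, if_true, if_false, ih (i + 1), lastMatch] <;>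
      cases hL1 : lastMatch element1 (i + 1) tl <;> cases hL2 : lastMatch element2 (i + 1) tl <;>
      simp [some_cast_getD_idxOf?, h1, h2]

-- B's backward scan equals lastMatch
theorem findB_prefix (target : String) (cs ds : List (String × List String)) :
    ∀ i, i ≤ cs.length → findB target (cs ++ ds) i = findB target cs i := by
  intro i
  induction i with
  | zero => intro _; rfl
  | succ j ih =>
    intro hle
    have hj : j < cs.length := Nat.lt_of_succ_le hle
    rw [findB, findB, List.getElem?_append_left hj]
    rw [ih (Nat.le_of_lt hj)]

theorem lastMatch_append_singleton (target : String) (cs : List (String × List String))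
    (s : String) (elements : List String) :
    ∀ i, lastMatch target i (cs ++ [(s, elements)]) =
      (if target ∈ elements then
        some (i + cs.length, (PySem.List.index? elements target).getD 0)
      else lastMatch target i cs) := by
  induction cs with
  | nil => intro i; simp [lastMatch]
  | cons hd tl ih =>
    intro i
    obtain ⟨t, es⟩ := hd
    show lastMatch target i ((t, es) :: (tl ++ [(s, elements)])) = _
    rw [lastMatch, ih (i + 1), lastMatch]
    by_cases h : target ∈ elements <;> simp [h, List.length_cons] <;> try omega

theorem findB_eq_lastMatch (target : String) (cs : List (String × List String)) :
    findB target cs cs.length =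
      (lastMatch target 0 cs).map (fun r => [(r.1 : Int), (r.2 : Int)]) := by
  induction cs using List.reverseRecOn with
  | nil => rfl
  | append_singleton tl hd ih =>
    obtain ⟨s, elements⟩ := hd
    rw [List.length_append, List.length_singleton, findB,
        List.getElem?_append_right (Nat.le_refl _)]
    simp only [Nat.sub_self, List.getElem?_cons_zero, Option.getD_some]
    rw [lastMatch_append_singleton]
    by_cases h : target ∈ elements
    · simp [h]
    · simp only [h, if_false]
      rw [findB_prefix target tl [(s, elements)] tl.length (Nat.le_refl _), ih]

-- ===== VERDICT (by name: the statement is the Claim_ definition above) =====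
theorem trouver_indices_spec : Claim_equal_trouver_indices := by
  intro element1 element2 contraintes _
  unfold Spec_trouver_indices trouver_indices trouver_indices_alt
  have hEnum : PySem.List.enumerate contraintes = PySem.List.enumerate contraintes ((0 : Nat) : Int) := by
    norm_num [PySem.List.enumerate]
  rw [hEnum, loopA_pair, findB_eq_lastMatch, findB_eq_lastMatch]
  cases lastMatch element1 0 contraintes <;> cases lastMatch element2 0 contraintes <;> simp
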